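-- pv_equiv track=rewrite | github.com/abrhinehart/CountyData2 | tests/test_journal_discipline.py | _module_blocks
-- ===== SOURCE A (Python) =====
-- REQUIRED_SECTIONS = [
--     "## Commission Radar (CR)",
--     "## Permit Tracker (PT)",
--     "## Builder Inventory (BI)",
--     "## Sales / CD2",
--     "## Platform / Infra",
-- ]
--
-- def _module_blocks(body: str) -> dict[str, str]:
--     """Return {module_header: text-from-that-header-to-the-next-module-header}."""
--     # Split on module-level headers; keep order.
--     positions: list[tuple[int, str]] = []
--     for header in REQUIRED_SECTIONS + ["## Drift canary regressions"]:
--         idx = body.find(header)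
--         if idx >= 0:
--             positions.append((idx, header))
--     positions.sort()
--     blocks: dict[str, str] = {}
--     for i, (start, header) in enumerate(positions):
--         end = positions[i + 1][0] if i + 1 < len(positions) else len(body)
--         blocks[header] = body[start:end]
--     return blocks
-- ===== SOURCE B (Python) =====
-- REQUIRED_SECTIONS = [
--     "## Commission Radar (CR)",
--     "## Permit Tracker (PT)",
--     "## Builder Inventory (BI)",
--     "## Sales / CD2",
--     "## Platform / Infra",
-- ]
--
-- _HEADERS = REQUIRED_SECTIONS + ["## Drift canary regressions"]
--
-- def _module_blocks(body: str) -> dict[str, str]: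
--     """Return {module_header: text-from-that-header-to-the-next-module-header}."""
--     # One left-to-right sweep: record each header at its first match position.
--     # The sweep visits positions in increasing order, so no sort is needed.
--     found: list[tuple[int, str]] = []
--     seen: set[str] = set()
--     for i in range(len(body)):
--         for h in _HEADERS:
--             if h not in seen and body.startswith(h, i):
--                 seen.add(h)
--                 found.append((i, h))
--     starts = [s for s, _ in found]
--     ends = starts[1:] + [len(body)]
--     return {h: body[s:e] for (s, h), e in zip(found, ends)}
-- ===== Notes on version B (the rewrite author's own statement) =====
-- stated objective: alternative
-- what changed: Replaces the per-header find-then-sort (one body scan per header, then tuple sort) by a single left-to-right sweep over the body that records each header at its first matching position with a seen-set, so the matches come out already ordered and no sort is needed.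
import Mathlib
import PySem

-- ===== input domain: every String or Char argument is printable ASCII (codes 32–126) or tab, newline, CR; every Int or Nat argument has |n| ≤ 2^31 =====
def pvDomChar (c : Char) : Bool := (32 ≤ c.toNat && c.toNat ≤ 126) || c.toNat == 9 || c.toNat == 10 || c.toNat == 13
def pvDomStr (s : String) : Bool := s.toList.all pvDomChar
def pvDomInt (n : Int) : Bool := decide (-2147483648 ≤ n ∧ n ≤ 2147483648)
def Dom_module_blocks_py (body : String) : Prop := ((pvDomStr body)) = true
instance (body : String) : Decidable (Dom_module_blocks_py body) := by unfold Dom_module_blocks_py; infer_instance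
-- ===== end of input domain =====

-- B replaces A's per-header find-then-sort by a single left-to-right sweep recording each
-- header at its first match, so the matches arrive already ordered (objective: alternative).

-- shared module constant REQUIRED_SECTIONS (+ the drift-canary header, as both files build it)
def pvRequiredSections : List String :=
  ["## Commission Radar (CR)", "## Permit Tracker (PT)", "## Builder Inventory (BI)",
   "## Sales / CD2", "## Platform / Infra"]

def pvHeaders : List String := pvRequiredSections ++ ["## Drift canary regressions"]

-- ===== PORT A =====
def module_blocks_py (body : String) : List (String × String) :=
  let positions : List (Int × String) :=
    pvHeaders.foldl (fun pos h =>
      let idx := PySem.Str.find body h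
      if 0 ≤ idx then pos ++ [(idx, h)] else pos) []
  let sortedPos := PySem.List.sorted2 positions Prod.fst Prod.snd   -- positions.sort(): tuple key
  let blocks : PySem.Dict String String :=
    (PySem.List.enumerate sortedPos).foldl (fun d p =>
      let e : Int := if p.1 + 1 < (sortedPos.length : Int)
        then ((PySem.List.pyGet? sortedPos (p.1 + 1)).getD (0, "")).1   -- in range under the guard
        else PySem.Str.len body
      d.insert p.2.2 (PySem.Str.slice body (some p.2.1) (some e)))
      PySem.Dict.empty
  blocks.items

-- ===== PORT B =====
def module_blocks_py_alt (body : String) : List (String × String) :=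
  let st := (PySem.List.pyRange 0 (PySem.Str.len body)).foldl
    (fun (st : List (Int × String) × PySem.Set String) i =>
      pvHeaders.foldl (fun (st2 : List (Int × String) × PySem.Set String) h =>
        -- body.startswith(h, i): exact as startswith on the drop, since 0 ≤ i ≤ len(body) here
        if ¬ PySem.Set.contains st2.2 h = true ∧
            PySem.Chars.startswith (body.toList.drop i.toNat) h.toList = true
        then (st2.1 ++ [(i, h)], PySem.Set.add st2.2 h) else st2) st)
    ([], PySem.Set.empty)
  let found := st.1
  let starts := found.map Prod.fst
  let ends := PySem.List.slice starts (some 1) none ++ [PySem.Str.len body]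
  (PySem.Dict.ofList ((found.zip ends).map
      (fun q => (q.1.2, PySem.Str.slice body (some q.1.1) (some q.2))))).items

-- ===== PRECONDITION & SPEC =====
def Spec_module_blocks_py (body : String) (out : List (String × String)) : Prop := out = module_blocks_py_alt body
instance (body : String) (out : List (String × String)) : Decidable (Spec_module_blocks_py body out) := by unfold Spec_module_blocks_py; infer_instance

-- ===== CLAIM (what is proved, stated in full; the proofs are below) =====
def Claim_equal_module_blocks_py : Prop := ∀ (body : String), Dom_module_blocks_py body → Spec_module_blocks_py body (module_blocks_py body)

-- ===== LEMMAS AND PROOFS =====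

-- abbreviation used only in the proofs
def pvFidx (s : List Char) (h : String) : Int := PySem.Chars.find s h.toList

-- facts about the six concrete headers
theorem pvHeaders_nodup : pvHeaders.Nodup := by decide

theorem pvHeaders_prefix_free :
    ∀ h1 ∈ pvHeaders, ∀ h2 ∈ pvHeaders, h1.toList <+: h2.toList → h1 = h2 := by decide

theorem pvHeaders_ne_nil : ∀ h ∈ pvHeaders, h.toList ≠ [] := by decide

-- two headers starting at the same place are equal
theorem pv_uniqueAt (t : List Char) :
    ∀ h1 ∈ pvHeaders, ∀ h2 ∈ pvHeaders, h1.toList <+: t → h2.toList <+: t → h1 = h2 := by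
  intro h1 m1 h2 m2 p1 p2
  rcases List.prefix_or_prefix_of_prefix p1 p2 with h | h
  · exact pvHeaders_prefix_free h1 m1 h2 m2 h
  · exact (pvHeaders_prefix_free h2 m2 h1 m1 h).symm

-- find = k characterisation
theorem pv_find_eq_iff (s hl : List Char) (k : Nat) :
    PySem.Chars.find s hl = (k : Int) ↔ (hl <+: s.drop k ∧ ∀ j < k, ¬ hl <+: s.drop j) := by
  constructor
  · intro he
    have hnn : 0 ≤ PySem.Chars.find s hl := by rw [he]; exact_mod_cast Int.natCast_nonneg k
    obtain ⟨hpre, hmin⟩ := PySem.Chars.find_spec hnn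
    have ht : (PySem.Chars.find s hl).toNat = k := by omega
    rw [ht] at hpre hmin
    exact ⟨hpre, hmin⟩
  · rintro ⟨hpre, hmin⟩
    have hinf : hl <:+: s := hpre.isInfix.trans (List.drop_suffix k s).isInfix
    have hnn := (PySem.Chars.find_nonneg_iff s hl).mpr hinf
    obtain ⟨hpre2, hmin2⟩ := PySem.Chars.find_spec hnn
    have h1 : ¬ ((PySem.Chars.find s hl).toNat < k) := fun hlt => hmin _ hlt hpre2
    have h2 : ¬ (k < (PySem.Chars.find s hl).toNat) := fun hlt => hmin2 k hlt hpre
    omega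

theorem pv_find_lt_len (s : List Char) (h : String) (hne : h.toList ≠ [])
    (hnn : 0 ≤ PySem.Chars.find s h.toList) :
    PySem.Chars.find s h.toList < (s.length : Int) := by
  obtain ⟨hpre, -⟩ := PySem.Chars.find_spec hnn
  have hlen := hpre.length_le
  rw [List.length_drop] at hlen
  have hpos : 0 < h.toList.length := List.length_pos_iff.mpr hne
  omega

-- ===== the B-side loop =====

def pvStateB (body : String) (k : Nat) : List (Int × String) × PySem.Set String :=
  (PySem.List.pyRange 0 (k : Int)).foldl
    (fun (st : List (Int × String) × PySem.Set String) i =>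
      pvHeaders.foldl (fun (st2 : List (Int × String) × PySem.Set String) h =>
        if ¬ PySem.Set.contains st2.2 h = true ∧
            PySem.Chars.startswith (body.toList.drop i.toNat) h.toList = true
        then (st2.1 ++ [(i, h)], PySem.Set.add st2.2 h) else st2) st)
    ([], PySem.Set.empty)

theorem pvStateB_zero (body : String) : pvStateB body 0 = ([], PySem.Set.empty) := by
  unfold pvStateB
  rw [show ((0 : Nat) : Int) = 0 from rfl, PySem.List.pyRange_one_eq_nil le_rfl]
  rfl

theorem pvStateB_succ (body : String) (k : Nat) :
    pvStateB body (k + 1) =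
      pvHeaders.foldl (fun (st2 : List (Int × String) × PySem.Set String) h =>
        if ¬ PySem.Set.contains st2.2 h = true ∧
            PySem.Chars.startswith (body.toList.drop ((k : Int)).toNat) h.toList = true
        then (st2.1 ++ [((k : Int), h)], PySem.Set.add st2.2 h) else st2) (pvStateB body k) := by
  unfold pvStateB
  rw [show (((k + 1 : Nat)) : Int) = (k : Int) + 1 by push_cast; ring,
    PySem.List.pyRange_one_succ_right (by exact_mod_cast Int.natCast_nonneg k),
    List.foldl_append, List.foldl_cons, List.foldl_nil]

-- the inner loop, explicitly
theorem pv_inner_spec (body : String) (i : Int) (hs' : List String) (hnd : hs'.Nodup)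
    (G : List (Int × String)) :
    hs'.foldl (fun (st2 : List (Int × String) × PySem.Set String) h =>
        if ¬ PySem.Set.contains st2.2 h = true ∧
            PySem.Chars.startswith (body.toList.drop i.toNat) h.toList = true
        then (st2.1 ++ [(i, h)], PySem.Set.add st2.2 h) else st2) (G, G.map Prod.snd)
    = (G ++ (hs'.filter (fun h => !(G.map Prod.snd).contains h &&
          PySem.Chars.startswith (body.toList.drop i.toNat) h.toList)).map (fun h => (i, h)),
       (G ++ (hs'.filter (fun h => !(G.map Prod.snd).contains h &&
          PySem.Chars.startswith (body.toList.drop i.toNat) h.toList)).map (fun h => (i, h))).map Prod.snd) := by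
  induction hs' generalizing G with
  | nil => simp
  | cons h t ih =>
    rw [List.nodup_cons] at hnd
    obtain ⟨hht, hnd⟩ := hnd
    rw [List.foldl_cons]
    dsimp only
    by_cases hc : (G.map Prod.snd).contains h = true
    · rw [if_neg (show ¬ (¬ PySem.Set.contains (G.map Prod.snd) h = true ∧ PySem.Chars.startswith (body.toList.drop i.toNat) h.toList = true) from fun hp => hp.1 hc)]
      have hcond : ((!(G.map Prod.snd).contains h &&
          PySem.Chars.startswith (body.toList.drop i.toNat) h.toList) : Bool) = false := by
        simp only [hc, Bool.not_true, Bool.false_and]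
      rw [show List.filter (fun x => !(G.map Prod.snd).contains x && PySem.Chars.startswith (body.toList.drop i.toNat) x.toList) (h :: t) = List.filter (fun x => !(G.map Prod.snd).contains x && PySem.Chars.startswith (body.toList.drop i.toNat) x.toList) t from by
        simp only [List.filter_cons, hcond, Bool.false_eq_true, if_false]]
      exact ih hnd G
    · by_cases hsw : PySem.Chars.startswith (body.toList.drop i.toNat) h.toList = true
      · rw [if_pos (show (¬ PySem.Set.contains (G.map Prod.snd) h = true ∧ PySem.Chars.startswith (body.toList.drop i.toNat) h.toList = true) from ⟨hc, hsw⟩)]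
        have hcf : (G.map Prod.snd).contains h = false := eq_false_of_ne_true hc
        have hcond : ((!(G.map Prod.snd).contains h &&
            PySem.Chars.startswith (body.toList.drop i.toNat) h.toList) : Bool) = true := by
          simp only [hcf, Bool.not_false, Bool.true_and, hsw]
        rw [show List.filter (fun x => !(G.map Prod.snd).contains x && PySem.Chars.startswith (body.toList.drop i.toNat) x.toList) (h :: t) = h :: List.filter (fun x => !(G.map Prod.snd).contains x && PySem.Chars.startswith (body.toList.drop i.toNat) x.toList) t from by
          simp only [List.filter_cons, hcond, if_true]]
        have hadd : PySem.Set.add (G.map Prod.snd) h = (G ++ [(i, h)]).map Prod.snd := by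
          simp only [PySem.Set.add]
          rw [show PySem.Set.contains (G.map Prod.snd) h = false from hcf]
          simp
        rw [hadd]
        have hrec := ih hnd (G ++ [(i, h)])
        rw [hrec]
        have hfc : t.filter (fun x => !((G ++ [(i, h)]).map Prod.snd).contains x &&
              PySem.Chars.startswith (body.toList.drop i.toNat) x.toList)
            = t.filter (fun x => !(G.map Prod.snd).contains x && PySem.Chars.startswith (body.toList.drop i.toNat) x.toList) := by
          apply List.filter_congr
          intro x hx
          have hxh : x ≠ h := fun he => hht (he ▸ hx)
          simp only [List.map_append, List.contains_eq_mem]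
          rw [decide_eq_decide.mpr (show (x ∈ List.map Prod.snd G ++ List.map Prod.snd [((i : Int), h)]) ↔ x ∈ List.map Prod.snd G by simp [hxh])]
        rw [hfc]
        simp
      · rw [if_neg (show ¬ (¬ PySem.Set.contains (G.map Prod.snd) h = true ∧ PySem.Chars.startswith (body.toList.drop i.toNat) h.toList = true) from fun hp => hsw hp.2)]
        have hswf : PySem.Chars.startswith (body.toList.drop i.toNat) h.toList = false :=
          eq_false_of_ne_true hsw
        have hcond : ((!(G.map Prod.snd).contains h &&
            PySem.Chars.startswith (body.toList.drop i.toNat) h.toList) : Bool) = false := by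
          simp only [hswf, Bool.and_false]
        rw [show List.filter (fun x => !(G.map Prod.snd).contains x && PySem.Chars.startswith (body.toList.drop i.toNat) x.toList) (h :: t) = List.filter (fun x => !(G.map Prod.snd).contains x && PySem.Chars.startswith (body.toList.drop i.toNat) x.toList) t from by
          simp only [List.filter_cons, hcond, Bool.false_eq_true, if_false]]
        exact ih hnd G

-- loop invariant for B's sweep
theorem pvStateB_spec (body : String) (k : Nat) :
    (pvStateB body k).2 = (pvStateB body k).1.map Prod.snd ∧
    (∀ p : Int × String, p ∈ (pvStateB body k).1 ↔
      p.2 ∈ pvHeaders ∧ pvFidx body.toList p.2 = p.1 ∧ 0 ≤ p.1 ∧ p.1 < (k : Int)) ∧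
    (pvStateB body k).1.Pairwise (fun p q => p.1 < q.1) := by
  induction k with
  | zero =>
    rw [pvStateB_zero]
    refine ⟨rfl, ?_, List.Pairwise.nil⟩
    intro p
    simp only [List.not_mem_nil, false_iff]
    rintro ⟨-, -, h1, h2⟩
    omega
  | succ k ih =>
    obtain ⟨h2, hmem, hpw⟩ := ih
    have hstate : pvStateB body k = ((pvStateB body k).1, (pvStateB body k).1.map Prod.snd) := by
      rw [← h2]
    rw [pvStateB_succ, hstate, pv_inner_spec body (k : Int) pvHeaders pvHeaders_nodup]
    set F := (pvStateB body k).1 with hF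
    have htn : ((k : Int)).toNat = k := Int.toNat_natCast k
    set cf : String → Bool := (fun h => !(F.map Prod.snd).contains h &&
        PySem.Chars.startswith (body.toList.drop ((k : Int)).toNat) h.toList) with hcf
    set NL : List (Int × String) := (pvHeaders.filter cf).map (fun h => ((k : Int), h)) with hNL
    -- the filter condition says: this header's first occurrence is exactly k
    have hcond : ∀ h ∈ pvHeaders, (cf h = true ↔ pvFidx body.toList h = (k : Int)) := by
      intro h hh
      have hcont : (F.map Prod.snd).contains h = true ↔
          (0 ≤ pvFidx body.toList h ∧ pvFidx body.toList h < (k : Int)) := by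
        rw [List.contains_eq_mem, decide_eq_true_iff, List.mem_map]
        constructor
        · rintro ⟨p, hp, hph⟩
          obtain ⟨-, hfi, hge, hlt⟩ := (hmem p).mp hp
          rw [hph] at hfi
          rw [hfi]
          exact ⟨hge, hlt⟩
        · rintro ⟨hge, hlt⟩
          exact ⟨(pvFidx body.toList h, h), (hmem _).mpr ⟨hh, rfl, hge, hlt⟩, rfl⟩
      rw [hcf]
      rw [htn, Bool.and_eq_true, Bool.not_eq_eq_eq_not, Bool.not_true,
        PySem.Chars.startswith_iff]
      constructor
      · rintro ⟨hnc, hpre⟩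
        have hnn : 0 ≤ pvFidx body.toList h := (PySem.Chars.find_nonneg_iff _ _).mpr
          (hpre.isInfix.trans (List.drop_suffix k body.toList).isInfix)
        have hnlt : ¬ (pvFidx body.toList h < (k : Int)) := fun hlt => by
          have := hcont.mpr ⟨hnn, hlt⟩
          rw [this] at hnc
          exact absurd hnc (by simp)
        obtain ⟨-, hmin2⟩ := PySem.Chars.find_spec (s := body.toList) (sub := h.toList) hnn
        have hle : ¬ ((k : Nat) < (pvFidx body.toList h).toNat) := fun hlt => hmin2 k hlt hpre
        unfold pvFidx at hnn hnlt hle ⊢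
        omega
      · intro hfk
        obtain ⟨hpre, hmin⟩ := (pv_find_eq_iff body.toList h.toList k).mp hfk
        refine ⟨?_, hpre⟩
        rw [← Bool.not_eq_true, hcont]
        rintro ⟨-, hlt⟩
        omega
    refine ⟨rfl, ?_, ?_⟩
    · intro p
      rw [List.mem_append]
      constructor
      · rintro (hp | hp)
        · obtain ⟨hh, hfi, hge, hlt⟩ := (hmem p).mp hp
          exact ⟨hh, hfi, hge, by push_cast; omega⟩
        · rw [hNL, List.mem_map] at hp
          obtain ⟨h, hh, rfl⟩ := hp
          rw [List.mem_filter] at hh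
          obtain ⟨hh, hc⟩ := hh
          have hfk := (hcond h hh).mp hc
          exact ⟨hh, hfk, by positivity, by push_cast; omega⟩
      · rintro ⟨hh, hfi, hge, hlt⟩
        by_cases hck : p.1 < (k : Int)
        · exact Or.inl ((hmem p).mpr ⟨hh, hfi, hge, hck⟩)
        · have hpk : p.1 = (k : Int) := by push_cast at hlt; omega
          right
          rw [hNL, List.mem_map]
          refine ⟨p.2, ?_, ?_⟩
          · rw [List.mem_filter]
            refine ⟨hh, (hcond p.2 hh).mpr ?_⟩
            rw [hfi, hpk]
          · rw [← hpk]
    · rw [List.pairwise_append]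
      refine ⟨hpw, ?_, ?_⟩
      · have hall : ∀ a ∈ pvHeaders.filter cf, ∀ b ∈ pvHeaders.filter cf, a = b := by
          intro a ha b hb
          rw [List.mem_filter] at ha hb
          obtain ⟨hpa, -⟩ := (pv_find_eq_iff body.toList a.toList k).mp ((hcond a ha.1).mp ha.2)
          obtain ⟨hpb, -⟩ := (pv_find_eq_iff body.toList b.toList k).mp ((hcond b hb.1).mp hb.2)
          exact pv_uniqueAt (body.toList.drop k) a ha.1 b hb.1 hpa hpb
        have hnd := pvHeaders_nodup.filter cf
        rw [hNL]
        rcases hlst : pvHeaders.filter cf with - | ⟨a, - | ⟨b, r⟩⟩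
        · simp
        · simp
        · exfalso
          rw [hlst] at hnd hall
          have hab : a = b := hall a List.mem_cons_self b (List.mem_cons_of_mem a List.mem_cons_self)
          rw [List.nodup_cons] at hnd
          exact hnd.1 (hab ▸ List.mem_cons_self)
      · intro p hp q hq
        obtain ⟨-, -, -, hlt⟩ := (hmem p).mp hp
        rw [hNL, List.mem_map] at hq
        obtain ⟨h, -, rfl⟩ := hq
        exact hlt

-- ===== the A-side position list =====

def pvPosA (body : String) : List (Int × String) :=
  pvHeaders.foldl (fun pos h =>
    let idx := PySem.Str.find body h
    if 0 ≤ idx then pos ++ [(idx, h)] else pos) []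

theorem pvPosA_eq (body : String) :
    pvPosA body = (pvHeaders.filter (fun h => decide (0 ≤ PySem.Str.find body h))).map
      (fun h => (PySem.Str.find body h, h)) := by
  suffices hgen : ∀ (hs : List String) (acc : List (Int × String)),
      hs.foldl (fun pos h =>
        let idx := PySem.Str.find body h
        if 0 ≤ idx then pos ++ [(idx, h)] else pos) acc
      = acc ++ (hs.filter (fun h => decide (0 ≤ PySem.Str.find body h))).map
          (fun h => (PySem.Str.find body h, h)) by
    simpa using hgen pvHeaders []
  intro hs
  induction hs with
  | nil => intro acc; simp
  | cons h t ih =>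
    intro acc
    rw [List.foldl_cons]
    dsimp only
    by_cases hc : 0 ≤ PySem.Str.find body h
    · rw [if_pos hc, ih, List.filter_cons, if_pos (by simpa using hc)]
      simp
    · rw [if_neg hc, ih, List.filter_cons, if_neg (by simpa using hc)]

theorem pvPosA_mem (body : String) (p : Int × String) :
    p ∈ pvPosA body ↔ p.2 ∈ pvHeaders ∧ pvFidx body.toList p.2 = p.1 ∧ 0 ≤ p.1 := by
  rw [pvPosA_eq, List.mem_map]
  constructor
  · rintro ⟨h, hh, rfl⟩
    rw [List.mem_filter, decide_eq_true_iff] at hh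
    exact ⟨hh.1, by simp [pvFidx, PySem.Str.find_eq], hh.2⟩
  · rintro ⟨hh, hfi, hge⟩
    have hfind : PySem.Str.find body p.2 = p.1 := by rw [PySem.Str.find_eq]; exact hfi
    refine ⟨p.2, ?_, ?_⟩
    · rw [List.mem_filter, decide_eq_true_iff, hfind]
      exact ⟨hh, hge⟩
    · rw [hfind]

theorem pvPosA_nodup (body : String) : (pvPosA body).Nodup := by
  rw [pvPosA_eq]
  exact (pvHeaders_nodup.filter _).map (fun a b hab => congrArg Prod.snd hab)

-- ===== sorting =====

theorem pv_insertBy_congr {α : Type} (b1 b2 : α → α → Bool) (x : α) (ys : List α)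
    (h : ∀ y ∈ ys, b1 x y = b2 x y) :
    PySem.List.insertBy b1 x ys = PySem.List.insertBy b2 x ys := by
  induction ys with
  | nil => rfl
  | cons y ys ih =>
    rw [show PySem.List.insertBy b1 x (y :: ys)
        = if b1 x y then x :: y :: ys else y :: PySem.List.insertBy b1 x ys from rfl,
      show PySem.List.insertBy b2 x (y :: ys)
        = if b2 x y then x :: y :: ys else y :: PySem.List.insertBy b2 x ys from rfl,
      h y List.mem_cons_self, ih (fun z hz => h z (List.mem_cons_of_mem y hz))]

theorem pv_foldl_insertBy_congr {α : Type} (b1 b2 : α → α → Bool) (P : α → Prop)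
    (h : ∀ a b, P a → P b → b1 a b = b2 a b) :
    ∀ (xs acc : List α), (∀ a ∈ acc, P a) → (∀ a ∈ xs, P a) →
    xs.foldl (fun acc x => PySem.List.insertBy b1 x acc) acc
      = xs.foldl (fun acc x => PySem.List.insertBy b2 x acc) acc := by
  intro xs
  induction xs with
  | nil => intro acc _ _; rfl
  | cons x t ih =>
    intro acc hacc hxs
    rw [List.foldl_cons, List.foldl_cons,
      pv_insertBy_congr b1 b2 x acc (fun y hy => h x y (hxs x List.mem_cons_self) (hacc y hy))]
    refine ih (PySem.List.insertBy b2 x acc) ?_ (fun a ha => hxs a (List.mem_cons_of_mem x ha))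
    intro a ha
    rcases (PySem.List.mem_insertBy b2 x a acc).mp ha with rfl | ha
    · exact hxs a List.mem_cons_self
    · exact hacc a ha

-- sorted2 by the (start, header) tuple = the strictly start-increasing list F
theorem pv_sorted_eq (body : String) :
    PySem.List.sorted2 (pvPosA body) Prod.fst Prod.snd
      = (pvStateB body body.toList.length).1 := by
  obtain ⟨-, hmemF, hpwF⟩ := pvStateB_spec body body.toList.length
  set F := (pvStateB body body.toList.length).1 with hFdef
  -- F and pvPosA body contain the same pairs
  have hsame : ∀ p : Int × String, p ∈ F ↔ p ∈ pvPosA body := by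
    intro p
    rw [hmemF, pvPosA_mem]
    constructor
    · rintro ⟨h1, h2, h3, -⟩; exact ⟨h1, h2, h3⟩
    · rintro ⟨h1, h2, h3⟩
      refine ⟨h1, h2, h3, ?_⟩
      rw [← h2]
      exact pv_find_lt_len body.toList p.2 (pvHeaders_ne_nil p.2 h1) (by show (0:Int) ≤ pvFidx body.toList p.2; rw [h2]; exact h3)
  have hndF : F.Nodup :=
    hpwF.imp (fun {a b} hlt => fun he => absurd (congrArg Prod.fst he) (ne_of_lt hlt))
  have hperm : F.Perm (pvPosA body) :=
    (List.perm_ext_iff_of_nodup hndF (pvPosA_nodup body)).mpr hsame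
  -- pairs of pvPosA with equal starts are equal
  have hkey : ∀ a ∈ pvPosA body, ∀ b ∈ pvPosA body, a.1 = b.1 → a = b := by
    intro a ha b hb hab
    obtain ⟨ha1, ha2, ha3⟩ := (pvPosA_mem body a).mp ha
    obtain ⟨hb1, hb2, hb3⟩ := (pvPosA_mem body b).mp hb
    obtain ⟨hpa, -⟩ := PySem.Chars.find_spec (s := body.toList) (sub := a.2.toList) (by show (0:Int) ≤ pvFidx body.toList a.2; rw [ha2]; exact ha3)
    obtain ⟨hpb, -⟩ := PySem.Chars.find_spec (s := body.toList) (sub := b.2.toList) (by show (0:Int) ≤ pvFidx body.toList b.2; rw [hb2]; exact hb3)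
    have hidx : (PySem.Chars.find body.toList a.2.toList).toNat
        = (PySem.Chars.find body.toList b.2.toList).toNat := by
      show (pvFidx body.toList a.2).toNat = (pvFidx body.toList b.2).toNat
      rw [ha2, hb2, hab]
    rw [hidx] at hpa
    have hsnd : a.2 = b.2 := pv_uniqueAt _ a.2 ha1 b.2 hb1 hpa hpb
    exact Prod.ext hab hsnd
  -- the tuple comparison collapses to comparison of starts
  have hcongr : PySem.List.sorted2 (pvPosA body) Prod.fst Prod.snd
      = PySem.List.sorted (pvPosA body) Prod.fst := by
    show (pvPosA body).foldl (fun acc x => PySem.List.insertBy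
        (fun a b => decide (a.1 < b.1) || (!decide (b.1 < a.1) && decide (a.2 < b.2))) x acc) []
      = (pvPosA body).foldl (fun acc x => PySem.List.insertBy
        (fun a b => decide (a.1 < b.1)) x acc) []
    refine pv_foldl_insertBy_congr _ _ (· ∈ pvPosA body) ?_ (pvPosA body) [] (by simp) (fun a ha => ha)
    intro a b hpa hpb
    by_cases hlt : a.1 < b.1
    · simp [hlt]
    · have h2 : ¬ a.2 < b.2 ∨ b.1 < a.1 := by
        by_cases hgt : b.1 < a.1
        · exact Or.inr hgt
        · have : a = b := hkey a hpa b hpb (le_antisymm (not_lt.mp hgt) (not_lt.mp hlt))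
          exact Or.inl (by rw [this]; exact lt_irrefl _)
      rcases h2 with h2 | h2 <;> simp [hlt, h2]
  rw [hcongr]
  exact PySem.List.sorted_eq_of_perm_of_pairwise_lt (pvPosA body) F Prod.fst hperm hpwF

-- ===== block building: index arithmetic = zip with shifted starts =====

theorem pv_length_enumerate {α : Type} (xs : List α) (s : Int) :
    (PySem.List.enumerate xs s).length = xs.length := by
  induction xs generalizing s with
  | nil => rfl
  | cons x t ih => simp [PySem.List.enumerate, ih]

theorem pv_enumerate_getElem {α : Type} (xs : List α) (s : Int) (i : Nat) (h : i < xs.length) :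
    (PySem.List.enumerate xs s)[i]'(by rw [pv_length_enumerate]; exact h) = (s + i, xs[i]) := by
  induction xs generalizing s i with
  | nil => exact absurd h (by simp)
  | cons x t ih =>
    cases i with
    | zero => simp [PySem.List.enumerate]
    | succ j =>
      have hj : j < t.length := by simpa using h
      have := ih (s + 1) j hj
      simp only [PySem.List.enumerate, List.getElem_cons_succ, this]
      rw [Prod.mk.injEq]
      refine ⟨by push_cast; ring, rfl⟩

theorem pv_blockEq (body : String) (F : List (Int × String)) :
    (PySem.List.enumerate F).map (fun p =>
      (p.2.2, PySem.Str.slice body (some p.2.1) (some (if p.1 + 1 < (F.length : Int)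
        then ((PySem.List.pyGet? F (p.1 + 1)).getD (0, "")).1
        else PySem.Str.len body))))
    = (F.zip (PySem.List.slice (F.map Prod.fst) (some 1) none ++ [PySem.Str.len body])).map
        (fun q => (q.1.2, PySem.Str.slice body (some q.1.1) (some q.2))) := by
  rw [PySem.List.slice_from_one]
  apply List.ext_getElem
  · rw [List.length_map, pv_length_enumerate, List.length_map, List.length_zip,
      List.length_append, List.length_tail, List.length_map]
    simp
    omega
  · intro i h1 h2
    rw [List.getElem_map, List.getElem_map, pv_enumerate_getElem F 0 i
      (by rw [List.length_map, pv_length_enumerate] at h1; exact h1), List.getElem_zip]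
    have hi : i < F.length := by rw [List.length_map, pv_length_enumerate] at h1; exact h1
    rw [Prod.mk.injEq]
    refine ⟨rfl, ?_⟩
    congr 1
    rw [Option.some_inj]
    by_cases hlt : i + 1 < F.length
    · rw [if_pos (by push_cast; omega)]
      rw [show (0 : Int) + (i : Int) + 1 = ((i + 1 : Nat) : Int) by push_cast; ring,
        PySem.List.pyGet?_natCast, List.getElem?_eq_getElem hlt]
      rw [List.getElem_append_left (by rw [List.length_tail, List.length_map]; omega)]
      rw [List.getElem_tail, List.getElem_map]
      rfl
    · rw [if_neg (by push_cast; omega)]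
      rw [List.getElem_append_right (by rw [List.length_tail, List.length_map]; omega)]
      simp

-- ===== assembly =====

theorem pv_main (body : String) : module_blocks_py body = module_blocks_py_alt body := by
  -- name the B-side sweep result
  have hloop : module_blocks_py_alt body
      = (PySem.Dict.ofList ((((pvStateB body body.toList.length).1).zip
          (PySem.List.slice (((pvStateB body body.toList.length).1).map Prod.fst) (some 1) none
            ++ [PySem.Str.len body])).map
          (fun q => (q.1.2, PySem.Str.slice body (some q.1.1) (some q.2))))).items := by
    unfold module_blocks_py_alt pvStateB
    rw [PySem.Str.len_eq]
  -- the A-side dict loop is ofList of the mapped enumerate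
  have hA : module_blocks_py body = (PySem.Dict.ofList ((PySem.List.enumerate (PySem.List.sorted2 (pvPosA body) Prod.fst Prod.snd)).map (fun p => (p.2.2, PySem.Str.slice body (some p.2.1) (some (if p.1 + 1 < ((PySem.List.sorted2 (pvPosA body) Prod.fst Prod.snd).length : Int) then ((PySem.List.pyGet? (PySem.List.sorted2 (pvPosA body) Prod.fst Prod.snd) (p.1 + 1)).getD (0, "")).1 else PySem.Str.len body)))))).items := by
    unfold module_blocks_py pvPosA PySem.Dict.ofList PySem.Dict.update
    rw [List.foldl_map]
  rw [hA, hloop, pv_sorted_eq body]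
  exact congrArg (fun l => (PySem.Dict.ofList l).items)
    (pv_blockEq body (pvStateB body body.toList.length).1)

-- ===== VERDICT (by name: the statement is the Claim_ definition above) =====
theorem module_blocks_py_spec : Claim_equal_module_blocks_py := by
  intro body _
  unfold Spec_module_blocks_py
  exact pv_main body
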